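-- pv_equiv track=rewrite | github.com/shahkabir1/Word-Guessing-Game | word_guesser.py | create_display
-- ===== SOURCE A (Python) =====
-- def create_display(text: str) -> str:
--     d = ""
--     for char in text:
--         if char.isalpha():
--             d += "_"
--         elif char == " ":
--             d += " "
--     return d
-- ===== SOURCE B (Python) =====
-- def create_display(text: str) -> str:
--     return " ".join(
--         "_" * sum(1 for c in token if c.isalpha())
--         for token in text.split(" ")
--     )
-- ===== Notes on version B (the rewrite author's own statement) =====
-- stated objective: idiomatic
-- what changed: Replaced the character-by-character accumulator loop by splitting the text on spaces, emitting one underscore per alphabetic character of each token, and joining the tokens back with spaces.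
import Mathlib
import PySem

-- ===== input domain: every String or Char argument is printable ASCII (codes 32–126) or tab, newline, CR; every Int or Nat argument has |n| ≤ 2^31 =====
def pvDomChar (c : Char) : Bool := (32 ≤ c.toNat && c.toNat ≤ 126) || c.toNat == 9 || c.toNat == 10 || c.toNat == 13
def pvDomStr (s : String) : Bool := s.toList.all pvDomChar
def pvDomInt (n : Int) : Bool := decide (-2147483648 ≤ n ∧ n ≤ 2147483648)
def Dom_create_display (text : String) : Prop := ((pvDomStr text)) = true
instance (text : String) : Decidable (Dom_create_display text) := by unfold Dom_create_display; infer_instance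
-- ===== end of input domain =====

-- B replaces A's char-by-char accumulator loop by splitting on spaces, emitting one underscore per alphabetic character of each token, and joining with spaces (idiomatic decomposition; same return value).


-- ===== PORT A =====
-- d = ""; for char in text: if char.isalpha(): d += "_" elif char == " ": d += " "; return d
def create_display (text : String) : String :=
  String.ofList (text.toList.foldl
    (fun d c =>
      if PySem.Chars.isalpha c then d ++ ['_']
      else if c = ' ' then d ++ [' ']
      else d) [])

-- ===== PORT B =====
-- " ".join("_" * sum(1 for c in token if c.isalpha()) for token in text.split(" "))
def create_display_alt (text : String) : String :=
  String.ofList (PySem.Chars.join [' ']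
    ((PySem.Chars.splitOn text.toList [' ']).map
      (fun tok => List.replicate (tok.countP (fun c => PySem.Chars.isalpha c)) '_')))

-- ===== PRECONDITION & SPEC =====
def Spec_create_display (text : String) (out : String) : Prop := out = create_display_alt text
instance (text : String) (out : String) : Decidable (Spec_create_display text out) := by unfold Spec_create_display; infer_instance

-- ===== CLAIM (what is proved, stated in full; the proofs are below) =====
def Claim_equal_create_display : Prop := ∀ (text : String), Dom_create_display text → Spec_create_display text (create_display text)

-- ===== LEMMAS AND PROOFS =====

-- the per-character emission both programs realise
def pvEmit (c : Char) : List Char :=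
  if PySem.Chars.isalpha c then ['_'] else if c = ' ' then [' '] else []

def pvMaskAll (cs : List Char) : List Char :=
  match cs with
  | [] => []
  | c :: rest => pvEmit c ++ pvMaskAll rest

-- split on ' ' with an explicit "current token" accumulator (reversed)
def pvSplit (cs : List Char) (cur : List Char) : List (List Char) :=
  match cs with
  | [] => [cur.reverse]
  | c :: rest => if c = ' ' then cur.reverse :: pvSplit rest [] else pvSplit rest (c :: cur)

def pvMask (tok : List Char) : List Char :=
  List.replicate (tok.countP (fun c => PySem.Chars.isalpha c)) '_'

lemma pvSplit_ne_nil (cs cur : List Char) : pvSplit cs cur ≠ [] := by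
  induction cs generalizing cur with
  | nil => simp [pvSplit]
  | cons c rest ih =>
    simp only [pvSplit]
    split_ifs <;> simp [ih]

lemma splitOn_go_eq (fuel : Nat) (l cur : List Char) (acc : List (List Char))
    (h : l.length < fuel) :
    PySem.Chars.splitOn.go [' '] fuel l cur acc = acc.reverse ++ pvSplit l cur := by
  induction fuel generalizing l cur acc with
  | zero => omega
  | succ fuel ih =>
    cases l with
    | nil => simp [PySem.Chars.splitOn.go, pvSplit]
    | cons c rest =>
      simp only [PySem.Chars.splitOn.go, List.isPrefixOf, pvSplit]
      by_cases hc : c = ' '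
      · simp only [hc, beq_self_eq_true, Bool.true_and, if_pos]
        have hd : List.drop [' '].length (' ' :: rest) = rest := rfl
        rw [hd, ih rest [] (cur.reverse :: acc) (by simp at h ⊢; omega)]
        simp
      · have : (' ' == c) = false := by
          rw [beq_eq_false_iff_ne]
          exact fun h' => hc h'.symm
        simp only [this, Bool.false_and, if_neg Bool.false_ne_true]
        rw [ih rest (c :: cur) acc (by simp at h ⊢; omega), if_neg hc]

lemma splitOn_eq (cs : List Char) : PySem.Chars.splitOn cs [' '] = pvSplit cs [] := by
  unfold PySem.Chars.splitOn
  rw [splitOn_go_eq cs.length.succ cs [] [] (by omega)]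
  simp

lemma foldl_eq_maskAll (cs d : List Char) :
    cs.foldl (fun d c =>
      if PySem.Chars.isalpha c then d ++ ['_']
      else if c = ' ' then d ++ [' ']
      else d) d = d ++ pvMaskAll cs := by
  induction cs generalizing d with
  | nil => simp [pvMaskAll]
  | cons c rest ih =>
    simp only [List.foldl_cons, pvMaskAll, pvEmit]
    split_ifs with h1 h2 <;> simp [ih]

lemma pvMask_append_singleton (tok : List Char) (c : Char) :
    pvMask (tok ++ [c]) = pvMask tok ++ pvEmit c ∨ (¬ PySem.Chars.isalpha c ∧ pvMask (tok ++ [c]) = pvMask tok) := by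
  by_cases h : PySem.Chars.isalpha c
  · left
    simp [pvMask, pvEmit, h, List.countP_append, List.replicate_succ' ]
  · right
    refine ⟨by simp [h], ?_⟩
    simp [pvMask, List.countP_append, h]

lemma join_pvSplit (cs cur : List Char) :
    PySem.Chars.join [' '] ((pvSplit cs cur).map pvMask) =
      pvMask cur.reverse ++ pvMaskAll cs := by
  induction cs generalizing cur with
  | nil => simp [pvSplit, pvMaskAll, PySem.Chars.join_singleton]
  | cons c rest ih =>
    simp only [pvSplit, pvMaskAll]
    by_cases hc : c = ' '
    · subst hc
      obtain ⟨b, t, hbt⟩ : ∃ b t, pvSplit rest [] = b :: t := by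
        cases h : pvSplit rest [] with
        | nil => exact absurd h (pvSplit_ne_nil rest [])
        | cons b t => exact ⟨b, t, rfl⟩
      rw [hbt]
      simp only [if_true, List.map_cons]
      rw [show PySem.Chars.join [' '] (pvMask (cur.reverse) :: pvMask b :: t.map pvMask)
            = pvMask cur.reverse ++ [' '] ++ PySem.Chars.join [' '] (pvMask b :: t.map pvMask) from
            PySem.Chars.join_cons_cons _ _ _ _]
      rw [← List.map_cons, ← hbt, ih]
      have : PySem.Chars.isalpha ' ' = false := by decide
      simp [pvEmit, this, pvMask]
    · rw [if_neg hc, ih]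
      have hrev : (c :: cur).reverse = cur.reverse ++ [c] := by simp
      rw [hrev]
      rcases pvMask_append_singleton cur.reverse c with h | ⟨hna, h⟩
      · rw [h, List.append_assoc]
      · rw [h]
        have : pvEmit c = [] := by
          simp [pvEmit, hna, hc]
        rw [this]
        simp

-- ===== VERDICT (by name: the statement is the Claim_ definition above) =====
theorem create_display_spec : Claim_equal_create_display := by
  intro text _
  unfold Spec_create_display create_display create_display_alt
  rw [foldl_eq_maskAll, splitOn_eq,
    show (fun tok => List.replicate (List.countP (fun c => PySem.Chars.isalpha c) tok) '_') = pvMask from rfl,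
    join_pvSplit]
  simp [pvMask]
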